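-- pv_equiv track=rewrite | github.com/pokerdio/generic | e/e-293.py | gen_admin
-- ===== SOURCE A (Python) =====
-- def listp(n):
--     sieve = list(range(n + 2))
--     ret = []
--     for i in range(2, n + 1):
--         if sieve[i] == i:
--             ret.append(i)
--             for j in range(i, n + 1, i):
--                 sieve[j] = i
--     return ret
--
-- def gen_admin(n):
--     last = [1]
--     ret = []
--     pv = listp(1000)
--
--     for p in pv:
--         new = []
--         for i in last:
--             while i * p <= n:
--                 i *= p
--                 new.append(i)
--         if not new:
--             break
--         ret.extend(new)
--         last = new
--
--     return sorted(ret)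
-- ===== SOURCE B (Python) =====
-- def listp(n):
--     sieve = list(range(n + 2))
--     ret = []
--     for i in range(2, n + 1):
--         if sieve[i] == i:
--             ret.append(i)
--             for j in range(i, n + 1, i):
--                 sieve[j] = i
--     return ret
--
-- def gen_admin(n):
--     pv = listp(1000)
--     ret = []
--
--     def rec(idx, cur):
--         if idx >= len(pv):
--             return
--         p = pv[idx]
--         val = cur * p
--         while val <= n:
--             ret.append(val)
--             rec(idx + 1, val)
--             val *= p
--
--     rec(0, 1)
--     return sorted(ret)
-- ===== Notes on version B (the rewrite author's own statement) =====
-- stated objective: alternative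
-- what changed: Replaces the BFS layer-by-layer expansion over per-prime lists (last/new) with a depth-first recursion over the prime index that carries only the current product and the recursion stack.
import Mathlib
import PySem

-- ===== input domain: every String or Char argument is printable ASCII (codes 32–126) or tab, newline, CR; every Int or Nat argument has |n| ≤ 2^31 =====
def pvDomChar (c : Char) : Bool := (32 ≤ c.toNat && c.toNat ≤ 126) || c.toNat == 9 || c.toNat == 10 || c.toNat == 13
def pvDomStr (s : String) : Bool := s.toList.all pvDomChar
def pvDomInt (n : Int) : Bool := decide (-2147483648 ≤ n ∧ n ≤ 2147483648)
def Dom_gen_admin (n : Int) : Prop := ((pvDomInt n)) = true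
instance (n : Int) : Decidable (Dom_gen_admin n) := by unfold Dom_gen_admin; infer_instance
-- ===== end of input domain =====

-- B replaces A's BFS layer-by-layer expansion with a DFS recursion over the prime index
-- (alternative decomposition, same cost); equivalence of the return values is proved below.

-- ===== PORT A =====
-- shared module helper listp (sieve of primes up to n); indices are always in range,
-- so sieve[i] is ported as (pyGet? i).getD 0 and sieve[j]=i as List.set j.toNat i (j ≥ 0).
def listp (n : Int) : List Int :=
  let sieve := PySem.List.pyRange 0 (n + 2) 1
  let res := (PySem.List.pyRange 2 (n + 1) 1).foldl
    (fun (st : List Int × List Int) i =>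
      let (sieve, ret) := st
      if (PySem.List.pyGet? sieve i).getD 0 = i then
        let ret := ret ++ [i]
        let sieve := (PySem.List.pyRange i (n + 1) i).foldl
          (fun s j => s.set j.toNat i) sieve
        (sieve, ret)
      else (sieve, ret))
    (sieve, [])
  res.2

-- A's inner 'while i * p <= n: i *= p; new.append(i)'; fuel n.toNat+1 bounds the
-- iteration count (i ≥ 1 and p ≥ 2 on every actual call, so ≤ log2 n iterations).
def powsA (n p : Int) : Int → Nat → List Int
  | _, 0 => []
  | i, f + 1 => if i * p ≤ n then (i * p) :: powsA n p (i * p) f else []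

-- A's 'for p in pv' loop with the break, carrying (last, ret) as state.
def loopA (n : Int) (F : Nat) : List Int → List Int → List Int → List Int
  | [], _, ret => ret
  | p :: rest, last, ret =>
      let new := last.flatMap (fun i => powsA n p i F)
      if new = [] then ret else loopA n F rest new (ret ++ new)

def gen_admin (n : Int) : List Int :=
  PySem.List.sorted (loopA n (n.toNat + 1) (listp 1000) [1] []) (fun x => x) false

-- ===== PORT B =====
-- B's rec(idx, cur): DFS over the prime list; innerB is its 'while val <= n' loop
-- (same fuel bound as A's inner while).
mutual
def dfsB (n : Int) (F : Nat) : List Int → Int → List Int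
  | [], _ => []
  | p :: rest, cur => innerB n F rest p (cur * p) F
termination_by ps _ => (ps.length, F + 1)
def innerB (n : Int) (F : Nat) (rest : List Int) (p : Int) : Int → Nat → List Int
  | _, 0 => []
  | val, f + 1 =>
      if val ≤ n then val :: (dfsB n F rest val ++ innerB n F rest p (val * p) f)
      else []
termination_by _ f => (rest.length + 1, f)
end

def gen_admin_alt (n : Int) : List Int :=
  PySem.List.sorted (dfsB n (n.toNat + 1) (listp 1000) 1) (fun x => x) false

-- ===== PRECONDITION & SPEC =====
def Spec_gen_admin (n : Int) (out : List Int) : Prop := out = gen_admin_alt n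
instance (n : Int) (out : List Int) : Decidable (Spec_gen_admin n out) := by unfold Spec_gen_admin; infer_instance

-- ===== CLAIM (what is proved, stated in full; the proofs are below) =====
def Claim_equal_gen_admin : Prop := ∀ (n : Int), Dom_gen_admin n → Spec_gen_admin n (gen_admin n)

-- ===== LEMMAS AND PROOFS =====

-- BFS layers without the break or the ret accumulator.
def bfs (n : Int) (F : Nat) : List Int → List Int → List Int
  | [], _ => []
  | p :: rest, last =>
      let new := last.flatMap (fun i => powsA n p i F)
      new ++ bfs n F rest new

lemma bfs_nil (n : Int) (F : Nat) (ps : List Int) : bfs n F ps [] = [] := by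
  induction ps with
  | nil => simp [bfs]
  | cons p rest ih => simp [bfs, ih]

lemma loopA_eq_bfs (n : Int) (F : Nat) (ps : List Int) :
    ∀ last ret, loopA n F ps last ret = ret ++ bfs n F ps last := by
  induction ps with
  | nil => intro last ret; simp [loopA, bfs]
  | cons p rest ih =>
      intro last ret
      simp only [loopA, bfs]
      split_ifs with h
      · rw [h, bfs_nil]; simp
      · rw [ih]; simp

-- B's while-loop started at val, as a pure powers list.
def powsL (n p : Int) : Int → Nat → List Int
  | _, 0 => []
  | val, f + 1 => if val ≤ n then val :: powsL n p (val * p) f else []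

lemma powsA_eq_powsL (n p : Int) (f : Nat) :
    ∀ i, powsA n p i f = powsL n p (i * p) f := by
  induction f with
  | zero => intro i; rfl
  | succ f ih => intro i; simp only [powsA, powsL]; rw [ih (i * p)]

lemma innerB_eq (n : Int) (F : Nat) (rest : List Int) (p : Int) (f : Nat) :
    ∀ val, innerB n F rest p val f
      = (powsL n p val f).flatMap (fun v => v :: dfsB n F rest v) := by
  induction f with
  | zero => intro val; simp [innerB, powsL]
  | succ f ih =>
      intro val
      rw [innerB, powsL]
      split_ifs with h
      · simp [ih (val * p)]
      · simp

lemma flatMap_cons_perm {α : Type} (g : α → List α) (L : List α) :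
    (L.flatMap (fun v => v :: g v)).Perm (L ++ L.flatMap g) := by
  induction L with
  | nil => simp
  | cons v L' ih =>
      have h2 : (g v ++ L'.flatMap (fun v => v :: g v)).Perm (L' ++ (g v ++ L'.flatMap g)) :=
        (List.Perm.append_left (g v) ih).trans (List.perm_append_comm_assoc _ _ _)
      simpa using List.Perm.cons v h2

lemma dfs_perm_bfs (n : Int) (F : Nat) (ps : List Int) :
    ∀ last : List Int, (last.flatMap (dfsB n F ps)).Perm (bfs n F ps last) := by
  induction ps with
  | nil => intro last; simp [dfsB, bfs]
  | cons p rest ih =>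
      intro last
      simp only [bfs]
      have h1 : last.flatMap (dfsB n F (p :: rest))
          = (last.flatMap (fun c => powsA n p c F)).flatMap (fun v => v :: dfsB n F rest v) := by
        rw [List.flatMap_assoc]
        apply List.flatMap_congr
        intro c _
        rw [dfsB, innerB_eq, powsA_eq_powsL]
      rw [h1]
      refine (flatMap_cons_perm _ _).trans ?_
      exact List.Perm.append_left _ (ih _)

theorem gen_admin_spec : Claim_equal_gen_admin := by
  intro n _
  unfold Spec_gen_admin gen_admin gen_admin_alt
  rw [PySem.List.sorted_id_eq_sorted_id_iff_perm]
  rw [loopA_eq_bfs]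
  have h : dfsB n (n.toNat + 1) (listp 1000) 1 = [(1 : Int)].flatMap (dfsB n (n.toNat + 1) (listp 1000)) := by
    simp
  rw [List.nil_append, h]
  exact List.Perm.symm (dfs_perm_bfs _ _ _ _)
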